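-- pv_equiv track=rewrite | github.com/yujeong-world/cuk_ai_team_project | utils.py | check_glitter
-- ===== SOURCE A (Python) =====
-- def check_glitter(agent_pos, goldLocation):
--     x, y = agent_pos
--     adjacent_positions = [(x-1, y), (x+1, y), (x, y-1), (x, y+1)]
--     for pos in adjacent_positions:
--         if 0 <= pos[0] < 4 and 0 <= pos[1] < 4:
--             if goldLocation[pos[0] * 4 + pos[1]]:
--                 return True
--     return False
-- ===== SOURCE B (Python) =====
-- def check_glitter(agent_pos, goldLocation):
--     x, y = agent_pos
--     for gx in range(4):
--         for gy in range(4):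
--             if abs(gx - x) + abs(gy - y) == 1 and goldLocation[gx * 4 + gy]:
--                 return True
--     return False
-- ===== Notes on version B (the rewrite author's own statement) =====
-- stated objective: alternative
-- what changed: Replaces A's probing of the 4 neighbor-offset candidates with bounds checks by a scan of the 4x4 board cells using a closed-form Manhattan-distance-1 adjacency test.
-- outside the precondition, e.g. on check_glitter((1, 0), [True, False]): A returns True, B returns True
import Mathlib
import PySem

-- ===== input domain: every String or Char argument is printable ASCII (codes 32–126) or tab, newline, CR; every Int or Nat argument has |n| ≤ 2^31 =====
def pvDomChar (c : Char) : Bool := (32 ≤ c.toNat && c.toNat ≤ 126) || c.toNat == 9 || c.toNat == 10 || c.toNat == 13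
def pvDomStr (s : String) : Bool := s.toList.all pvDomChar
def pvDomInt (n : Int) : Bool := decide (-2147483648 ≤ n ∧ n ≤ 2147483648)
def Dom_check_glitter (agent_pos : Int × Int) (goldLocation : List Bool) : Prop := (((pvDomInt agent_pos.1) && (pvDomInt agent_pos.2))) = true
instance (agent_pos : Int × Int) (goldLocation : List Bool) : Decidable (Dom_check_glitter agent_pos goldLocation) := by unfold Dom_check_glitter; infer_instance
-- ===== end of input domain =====

-- B replaces A's neighbor-offset probing (candidate list + bounds checks) by a scan of the
-- 4×4 board with a closed-form Manhattan-distance-1 adjacency test (objective: alternative).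

-- ===== PORT A =====
-- loop over the 4 adjacent candidate positions; an out-of-range board read (Python IndexError,
-- excluded by Pre_) is rendered as getD false
def pvLoopA (goldLocation : List Bool) : List (Int × Int) → Bool
  | [] => false
  | pos :: rest =>
    if 0 ≤ pos.1 ∧ pos.1 < 4 ∧ 0 ≤ pos.2 ∧ pos.2 < 4 then
      if (PySem.List.pyGet? goldLocation (pos.1 * 4 + pos.2)).getD false then true
      else pvLoopA goldLocation rest
    else pvLoopA goldLocation rest

def check_glitter (agent_pos : Int × Int) (goldLocation : List Bool) : Bool :=
  let x := agent_pos.1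
  let y := agent_pos.2
  pvLoopA goldLocation [(x-1, y), (x+1, y), (x, y-1), (x, y+1)]

-- ===== PORT B =====
-- inner loop over gy (columns); out-of-range read rendered as getD false (excluded by Pre_)
def pvColScanB (x y gx : Int) (goldLocation : List Bool) : List Int → Bool
  | [] => false
  | gy :: rest =>
    if (gx - x).natAbs + (gy - y).natAbs = 1 ∧
        (PySem.List.pyGet? goldLocation (gx * 4 + gy)).getD false = true then true
    else pvColScanB x y gx goldLocation rest

-- outer loop over gx (rows)
def pvRowScanB (x y : Int) (goldLocation : List Bool) : List Int → Bool
  | [] => false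
  | gx :: rest =>
    if pvColScanB x y gx goldLocation (PySem.List.pyRange 0 4 1) then true
    else pvRowScanB x y goldLocation rest

def check_glitter_alt (agent_pos : Int × Int) (goldLocation : List Bool) : Bool :=
  pvRowScanB agent_pos.1 agent_pos.2 goldLocation (PySem.List.pyRange 0 4 1)

-- ===== PRECONDITION & SPEC =====
-- Pre_ excludes inputs where goldLocation is too short to cover every in-board neighbor of the
-- agent: there A may raise IndexError (though it can still return True when it finds gold
-- before reaching the out-of-range access, an accident of its probing order).
def Pre_check_glitter (agent_pos : Int × Int) (goldLocation : List Bool) : Prop :=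
  ∀ p ∈ [(agent_pos.1 - 1, agent_pos.2), (agent_pos.1 + 1, agent_pos.2),
         (agent_pos.1, agent_pos.2 - 1), (agent_pos.1, agent_pos.2 + 1)],
    (0 ≤ p.1 ∧ p.1 < 4 ∧ 0 ≤ p.2 ∧ p.2 < 4) → (p.1 * 4 + p.2).toNat < goldLocation.length
instance (agent_pos : Int × Int) (goldLocation : List Bool) : Decidable (Pre_check_glitter agent_pos goldLocation) := by unfold Pre_check_glitter; infer_instance

def pvWitness_check_glitter : (Int × Int) × List Bool :=
  ((0, 0), [false, true, false, false, true, false, false, false,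
            false, false, false, false, false, false, false, false])

def Spec_check_glitter (agent_pos : Int × Int) (goldLocation : List Bool) (out : Bool) : Prop := out = check_glitter_alt agent_pos goldLocation
instance (agent_pos : Int × Int) (goldLocation : List Bool) (out : Bool) : Decidable (Spec_check_glitter agent_pos goldLocation out) := by unfold Spec_check_glitter; infer_instance

-- ===== CLAIM (what is proved, stated in full; the proofs are below) =====
def Claim_equal_check_glitter : Prop := ∀ (agent_pos : Int × Int) (goldLocation : List Bool), Dom_check_glitter agent_pos goldLocation → Pre_check_glitter agent_pos goldLocation → Spec_check_glitter agent_pos goldLocation (check_glitter agent_pos goldLocation)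

-- ===== LEMMAS AND PROOFS =====

theorem pvLoopA_true_iff (g : List Bool) (l : List (Int × Int)) :
    pvLoopA g l = true ↔ ∃ p ∈ l, (0 ≤ p.1 ∧ p.1 < 4 ∧ 0 ≤ p.2 ∧ p.2 < 4) ∧
      (PySem.List.pyGet? g (p.1 * 4 + p.2)).getD false = true := by
  induction l with
  | nil => simp [pvLoopA]
  | cons p rest ih =>
    simp only [pvLoopA]
    split_ifs with h1 h2
    · simp [h1, h2]
    · simp only [List.mem_cons, ih]
      constructor
      · rintro ⟨q, hq, hc⟩; exact ⟨q, Or.inr hq, hc⟩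
      · rintro ⟨q, hq | hq, hc⟩
        · subst hq; exact absurd hc.2 (by simpa using h2)
        · exact ⟨q, hq, hc⟩
    · simp only [List.mem_cons, ih]
      constructor
      · rintro ⟨q, hq, hc⟩; exact ⟨q, Or.inr hq, hc⟩
      · rintro ⟨q, hq | hq, hc⟩
        · subst hq; exact absurd hc.1 h1
        · exact ⟨q, hq, hc⟩

theorem pvColScanB_true_iff (x y gx : Int) (g : List Bool) (l : List Int) :
    pvColScanB x y gx g l = true ↔ ∃ gy ∈ l, (gx - x).natAbs + (gy - y).natAbs = 1 ∧
      (PySem.List.pyGet? g (gx * 4 + gy)).getD false = true := by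
  induction l with
  | nil => simp [pvColScanB]
  | cons gy rest ih =>
    simp only [pvColScanB]
    split_ifs with h
    · simp [h]
    · simp only [List.mem_cons, ih]
      constructor
      · rintro ⟨q, hq, hc⟩; exact ⟨q, Or.inr hq, hc⟩
      · rintro ⟨q, hq | hq, hc⟩
        · subst hq; exact absurd hc h
        · exact ⟨q, hq, hc⟩

theorem pvRowScanB_true_iff (x y : Int) (g : List Bool) (l : List Int) :
    pvRowScanB x y g l = true ↔ ∃ gx ∈ l, pvColScanB x y gx g (PySem.List.pyRange 0 4 1) = true := by
  induction l with
  | nil => simp [pvRowScanB]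
  | cons gx rest ih =>
    simp only [pvRowScanB]
    split_ifs with h
    · simp [h]
    · simp only [List.mem_cons, ih]
      constructor
      · rintro ⟨q, hq, hc⟩; exact ⟨q, Or.inr hq, hc⟩
      · rintro ⟨q, hq | hq, hc⟩
        · subst hq; exact absurd hc h
        · exact ⟨q, hq, hc⟩

theorem pvRange4 : PySem.List.pyRange 0 4 1 = [0, 1, 2, 3] := by decide

theorem check_glitter_spec : Claim_equal_check_glitter := by
  intro ⟨x, y⟩ g _ _
  show check_glitter (x, y) g = check_glitter_alt (x, y) g
  rw [Bool.eq_iff_iff]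
  simp only [check_glitter, check_glitter_alt, pvLoopA_true_iff, pvRowScanB_true_iff,
    pvColScanB_true_iff, pvRange4]
  constructor
  · rintro ⟨p, hp, hb, hg⟩
    simp only [List.mem_cons, List.not_mem_nil, or_false] at hp
    rcases hp with h | h | h | h <;> subst h
    · have hb' : 0 ≤ x - 1 ∧ x - 1 < 4 ∧ 0 ≤ y ∧ y < 4 := hb
      exact ⟨x - 1, by simp; omega, y, by simp; omega, by omega, hg⟩
    · have hb' : 0 ≤ x + 1 ∧ x + 1 < 4 ∧ 0 ≤ y ∧ y < 4 := hb
      exact ⟨x + 1, by simp; omega, y, by simp; omega, by omega, hg⟩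
    · have hb' : 0 ≤ x ∧ x < 4 ∧ 0 ≤ y - 1 ∧ y - 1 < 4 := hb
      exact ⟨x, by simp; omega, y - 1, by simp; omega, by omega, hg⟩
    · have hb' : 0 ≤ x ∧ x < 4 ∧ 0 ≤ y + 1 ∧ y + 1 < 4 := hb
      exact ⟨x, by simp; omega, y + 1, by simp; omega, by omega, hg⟩
  · rintro ⟨gx, hgx, gy, hgy, hman, hg⟩
    simp only [List.mem_cons, List.not_mem_nil, or_false] at hgx hgy
    have hb : 0 ≤ gx ∧ gx < 4 ∧ 0 ≤ gy ∧ gy < 4 := by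
      rcases hgx with h|h|h|h <;> rcases hgy with h'|h'|h'|h' <;> omega
    have hcases : (gx = x - 1 ∧ gy = y) ∨ (gx = x + 1 ∧ gy = y) ∨
        (gx = x ∧ gy = y - 1) ∨ (gx = x ∧ gy = y + 1) := by omega
    rcases hcases with ⟨h1, h2⟩ | ⟨h1, h2⟩ | ⟨h1, h2⟩ | ⟨h1, h2⟩
    · exact ⟨(x - 1, y), by simp, by constructor <;> [omega; constructor <;> [omega; constructor <;> omega]],
        by rw [show (x - 1) * 4 + y = gx * 4 + gy by omega]; exact hg⟩
    · exact ⟨(x + 1, y), by simp, by constructor <;> [omega; constructor <;> [omega; constructor <;> omega]],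
        by rw [show (x + 1) * 4 + y = gx * 4 + gy by omega]; exact hg⟩
    · exact ⟨(x, y - 1), by simp, by constructor <;> [omega; constructor <;> [omega; constructor <;> omega]],
        by rw [show x * 4 + (y - 1) = gx * 4 + gy by omega]; exact hg⟩
    · exact ⟨(x, y + 1), by simp, by constructor <;> [omega; constructor <;> [omega; constructor <;> omega]],
        by rw [show x * 4 + (y + 1) = gx * 4 + gy by omega]; exact hg⟩
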